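-- pv_equiv track=rewrite | github.com/Jeandsmith/Algorithms | find_greatest_product_of_three.py | fgpot
-- ===== SOURCE A (Python) =====
-- def fgpot(Ar):
--     g = 0
--     steps = 0
--     for a in range(len(Ar)):
--         for b in range(a + 1, len(Ar)):
--             for c in range(b + 1, len(Ar)):
--                 if g < (Ar[a]*Ar[b]*Ar[c]):
--                     g = (Ar[a]*Ar[b]*Ar[c])
--                 steps += 1
--     return (steps, g)
-- ===== SOURCE B (Python) =====
-- def fgpot(Ar):
--     # One pass: track max/min element and max/min pair product seen so far;
--     # best triple product (floored at 0) falls out; step count is C(n, 3).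
--     g = 0
--     max1 = min1 = max2 = min2 = None
--     for x in Ar:
--         if max2 is not None:
--             g = max(g, max2 * x, min2 * x)
--         if max1 is not None:
--             if max2 is None:
--                 max2 = min2 = max1 * x
--             else:
--                 max2 = max(max2, max1 * x, min1 * x)
--                 min2 = min(min2, max1 * x, min1 * x)
--             max1 = max(max1, x)
--             min1 = min(min1, x)
--         else:
--             max1 = min1 = x
--     n = len(Ar)
--     return (n * (n - 1) * (n - 2) // 6, g)
-- ===== Notes on version B (the rewrite author's own statement) =====
-- stated objective: faster
-- what changed: Replaces the O(n^3) triple nested loop with a single O(n) pass that tracks the max/min element and max/min pair product seen so far (updating the best triple product from them), and computes the step count by the closed formula n*(n-1)*(n-2)//6.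
import Mathlib
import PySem

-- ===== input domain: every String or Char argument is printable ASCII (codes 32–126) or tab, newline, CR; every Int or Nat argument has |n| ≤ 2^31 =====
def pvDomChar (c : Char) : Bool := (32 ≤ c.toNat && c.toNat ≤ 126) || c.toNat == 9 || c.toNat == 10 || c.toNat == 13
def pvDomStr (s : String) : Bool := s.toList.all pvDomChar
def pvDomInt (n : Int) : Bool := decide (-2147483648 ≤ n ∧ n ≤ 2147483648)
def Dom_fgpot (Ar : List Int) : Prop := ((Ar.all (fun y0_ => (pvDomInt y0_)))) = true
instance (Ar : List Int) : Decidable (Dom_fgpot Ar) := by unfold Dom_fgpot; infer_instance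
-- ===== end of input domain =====

-- B replaces A's O(n^3) triple loop by one O(n) pass tracking extremal elements and
-- pair products (step count by the closed formula n(n-1)(n-2)//6); proved equal on all inputs.

-- ===== PORT A =====
-- triple nested index loop, running maximum g (floored at 0 by its initial value) and step counter
def fgpot (Ar : List Int) : Int × Int :=
  let s :=
    (PySem.List.pyRange 0 (PySem.List.len Ar) 1).foldl (fun s a =>
      (PySem.List.pyRange (a + 1) (PySem.List.len Ar) 1).foldl (fun s b =>
        (PySem.List.pyRange (b + 1) (PySem.List.len Ar) 1).foldl (fun s c =>
          (if s.1 < PySem.List.pyGetD Ar a 0 * PySem.List.pyGetD Ar b 0 * PySem.List.pyGetD Ar c 0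
           then PySem.List.pyGetD Ar a 0 * PySem.List.pyGetD Ar b 0 * PySem.List.pyGetD Ar c 0
           else s.1,
           s.2 + 1)) s) s) ((0 : Int), (0 : Int))
  (s.2, s.1)

-- ===== PORT B =====
-- loop body of B: state (g, max1, min1, max2, min2); None ↦ none
def fgpotStep (s : Int × Option Int × Option Int × Option Int × Option Int) (x : Int) :
    Int × Option Int × Option Int × Option Int × Option Int :=
  match s with
  | (g, m1, n1, m2, n2) =>
    let g' : Int :=
      match m2, n2 with
      | some M2, some m2v => max g (max (M2 * x) (m2v * x))
      | _, _ => g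
    match m1, n1, m2, n2 with
    | some M1, some m1v, some M2, some m2v =>
        (g', some (max M1 x), some (min m1v x),
         some (max M2 (max (M1 * x) (m1v * x))), some (min m2v (min (M1 * x) (m1v * x))))
    | some M1, some m1v, none, none =>
        (g', some (max M1 x), some (min m1v x), some (M1 * x), some (M1 * x))
    | _, _, _, _ => (g', some x, some x, none, none)

def fgpot_alt (Ar : List Int) : Int × Int :=
  let st := Ar.foldl fgpotStep (0, none, none, none, none)
  let n : Int := PySem.List.len Ar
  (PySem.Int.floordiv (n * (n - 1) * (n - 2)) 6, st.1)

-- ===== PRECONDITION & SPEC =====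
def Spec_fgpot (Ar : List Int) (out : Int × Int) : Prop := out = fgpot_alt Ar
instance (Ar : List Int) (out : Int × Int) : Decidable (Spec_fgpot Ar out) := by unfold Spec_fgpot; infer_instance

-- ===== CLAIM (what is proved, stated in full; the proofs are below) =====
def Claim_equal_fgpot : Prop := ∀ (Ar : List Int), Dom_fgpot Ar → Spec_fgpot Ar (fgpot Ar)

-- ===== LEMMAS AND PROOFS =====

-- products of all ordered pairs i<j, in A's (lexicographic-by-first-index) order
def prods2 : List Int → List Int
  | [] => []
  | y :: t => t.map (fun z => y * z) ++ prods2 t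

-- products of all triples i<j<k, in A's order
def prods3 : List Int → List Int
  | [] => []
  | x :: t => (prods2 t).map (fun q => x * q) ++ prods3 t

theorem if_lt_eq_max (a b : Int) : (if a < b then b else a) = max a b := by omega


-- max?/min? are invariant under permutation (no library lemma closes this; proved once here)
theorem max?_perm (l l' : List Int) (h : l.Perm l') : l.max? = l'.max? := by
  cases hm : l'.max? with
  | none =>
    rw [List.max?_eq_none_iff] at hm; subst hm
    rw [List.max?_eq_none_iff]; exact h.eq_nil
  | some a =>
    rw [List.max?_eq_some_iff] at hm ⊢
    exact ⟨h.mem_iff.2 hm.1, fun b hb => hm.2 b (h.subset hb)⟩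

theorem min?_perm (l l' : List Int) (h : l.Perm l') : l.min? = l'.min? := by
  cases hm : l'.min? with
  | none =>
    rw [List.min?_eq_none_iff] at hm; subst hm
    rw [List.min?_eq_none_iff]; exact h.eq_nil
  | some a =>
    rw [List.min?_eq_some_iff] at hm ⊢
    exact ⟨h.mem_iff.2 hm.1, fun b hb => hm.2 b (h.subset hb)⟩

-- scaling by a nonpositive factor swaps min and max
theorem min_mul_of_nonpos' (a b c : Int) (h : c ≤ 0) : min a b * c = max (a * c) (b * c) := by
  rcases le_total a b with h' | h' <;>
    [ (rw [min_eq_left h', max_eq_left (mul_le_mul_of_nonpos_right h' h)]);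
      (rw [min_eq_right h', max_eq_right (mul_le_mul_of_nonpos_right h' h)]) ]

theorem max_mul_of_nonpos' (a b c : Int) (h : c ≤ 0) : max a b * c = min (a * c) (b * c) := by
  rcases le_total a b with h' | h' <;>
    [ (rw [max_eq_right h', min_eq_right (mul_le_mul_of_nonpos_right h' h)]);
      (rw [max_eq_left h', min_eq_left (mul_le_mul_of_nonpos_right h' h)]) ]

theorem foldl_max_map_mul_nonneg (t : List Int) : ∀ (a x : Int), 0 ≤ x →
    (t.map (fun z => z * x)).foldl max (a * x) = (t.foldl max a) * x := by
  induction t with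
  | nil => intro a x _; simp
  | cons z t ih =>
    intro a x hx
    simp only [List.map_cons, List.foldl_cons]
    rw [← max_mul_of_nonneg a z hx, ih (max a z) x hx]

theorem foldl_max_map_mul_nonpos (t : List Int) : ∀ (a x : Int), x ≤ 0 →
    (t.map (fun z => z * x)).foldl max (a * x) = (t.foldl min a) * x := by
  induction t with
  | nil => intro a x _; simp
  | cons z t ih =>
    intro a x hx
    simp only [List.map_cons, List.foldl_cons]
    rw [← min_mul_of_nonpos' a z x hx, ih (min a z) x hx]

theorem foldl_min_map_mul_nonneg (t : List Int) : ∀ (a x : Int), 0 ≤ x →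
    (t.map (fun z => z * x)).foldl min (a * x) = (t.foldl min a) * x := by
  induction t with
  | nil => intro a x _; simp
  | cons z t ih =>
    intro a x hx
    simp only [List.map_cons, List.foldl_cons]
    rw [← min_mul_of_nonneg a z hx, ih (min a z) x hx]

theorem foldl_min_map_mul_nonpos (t : List Int) : ∀ (a x : Int), x ≤ 0 →
    (t.map (fun z => z * x)).foldl min (a * x) = (t.foldl max a) * x := by
  induction t with
  | nil => intro a x _; simp
  | cons z t ih =>
    intro a x hx
    simp only [List.map_cons, List.foldl_cons]
    rw [← max_mul_of_nonpos' a z x hx, ih (max a z) x hx]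

theorem foldl_min_le_foldl_max (t : List Int) (a : Int) : t.foldl min a ≤ t.foldl max a :=
  le_trans (PySem.List.foldl_min_le t a).1 (PySem.List.le_foldl_max t a).1

theorem foldl_max_map_mul (t : List Int) (a x : Int) :
    (t.map (fun z => z * x)).foldl max (a * x)
      = max ((t.foldl max a) * x) ((t.foldl min a) * x) := by
  rcases le_total 0 x with hx | hx
  · rw [foldl_max_map_mul_nonneg t a x hx,
        max_eq_left (mul_le_mul_of_nonneg_right (foldl_min_le_foldl_max t a) hx)]
  · rw [foldl_max_map_mul_nonpos t a x hx,
        max_eq_right (mul_le_mul_of_nonpos_right (foldl_min_le_foldl_max t a) hx)]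

theorem foldl_min_map_mul (t : List Int) (a x : Int) :
    (t.map (fun z => z * x)).foldl min (a * x)
      = min ((t.foldl max a) * x) ((t.foldl min a) * x) := by
  rcases le_total 0 x with hx | hx
  · rw [foldl_min_map_mul_nonneg t a x hx,
        min_eq_right (mul_le_mul_of_nonneg_right (foldl_min_le_foldl_max t a) hx)]
  · rw [foldl_min_map_mul_nonpos t a x hx,
        min_eq_left (mul_le_mul_of_nonpos_right (foldl_min_le_foldl_max t a) hx)]

theorem foldl_max_pull (t : List Int) : ∀ (g a : Int), t.foldl max (max g a) = max g (t.foldl max a) := by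
  induction t with
  | nil => intro g a; simp
  | cons z t ih => intro g a; simp only [List.foldl_cons, max_assoc]; exact ih g (max a z)

theorem foldl_min_pull (t : List Int) : ∀ (g a : Int), t.foldl min (min g a) = min g (t.foldl min a) := by
  induction t with
  | nil => intro g a; simp
  | cons z t ih => intro g a; simp only [List.foldl_cons, min_assoc]; exact ih g (min a z)

-- the pair/triple product lists of p ++ [x], up to permutation
theorem prods2_append (p : List Int) (x : Int) :
    (prods2 (p ++ [x])).Perm (prods2 p ++ p.map (fun z => z * x)) := by
  induction p with
  | nil => simp [prods2]
  | cons y t ih =>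
    rw [List.perm_iff_count]; intro b
    have hc := ih.count_eq b
    simp only [List.cons_append, prods2, List.count_append, List.map_append, List.map_cons,
      List.count_cons, List.map_nil, List.count_nil, mul_comm] at hc ⊢
    omega

theorem prods3_append (p : List Int) (x : Int) :
    (prods3 (p ++ [x])).Perm (prods3 p ++ (prods2 p).map (fun q => q * x)) := by
  induction p with
  | nil => simp [prods3, prods2]
  | cons a t ih =>
    rw [List.perm_iff_count]; intro b
    have hc := ih.count_eq b
    have hc2 := ((prods2_append t x).map (fun q => a * q)).count_eq b
    simp only [List.cons_append, prods3, prods2, List.count_append, List.map_append,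
      List.map_map, Function.comp_def, mul_comm, mul_left_comm] at hc hc2 ⊢
    omega

-- state abstraction for B: after processing prefix p the state is sigma p
def sigma (p : List Int) : Int × Option Int × Option Int × Option Int × Option Int :=
  ((prods3 p).foldl max 0, p.max?, p.min?, (prods2 p).max?, (prods2 p).min?)

theorem step_sigma (p : List Int) (x : Int) : fgpotStep (sigma p) x = sigma (p ++ [x]) := by
  match p with
  | [] => simp [sigma, fgpotStep, prods2, prods3]
  | [a] => simp [sigma, fgpotStep, prods2, prods3]
  | a :: b :: t =>
    have hp2 : prods2 (a :: b :: t) = a * b :: (t.map (fun z => a * z) ++ prods2 (b :: t)) := by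
      simp [prods2]
    set G := (prods3 (a :: b :: t)).foldl max 0 with hG
    set M1 := (b :: t).foldl max a with hM1
    set m1 := (b :: t).foldl min a with hm1
    set R := t.map (fun z => a * z) ++ prods2 (b :: t) with hRdef
    set M2 := R.foldl max (a * b) with hM2
    set m2 := R.foldl min (a * b) with hm2
    have hσ : sigma (a :: b :: t) = (G, some M1, some m1, some M2, some m2) := rfl
    rw [hσ]
    have hstep : fgpotStep (G, some M1, some m1, some M2, some m2) x
        = (max G (max (M2 * x) (m2 * x)), some (max M1 x), some (min m1 x),
           some (max M2 (max (M1 * x) (m1 * x))), some (min m2 (min (M1 * x) (m1 * x)))) := rfl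
    rw [hstep]
    -- now compute sigma ((a :: b :: t) ++ [x]) field by field
    have f1 : (prods3 ((a :: b :: t) ++ [x])).foldl max 0 = max G (max (M2 * x) (m2 * x)) := by
      rw [List.Perm.foldl_op_eq (prods3_append (a :: b :: t) x), List.foldl_append, ← hG, hp2]
      simp only [List.map_cons]
      rw [List.foldl_cons, foldl_max_pull, foldl_max_map_mul]
    have f2 : ((a :: b :: t) ++ [x]).max? = some (max M1 x) := by
      rw [List.cons_append, List.max?_cons', List.foldl_append, ← hM1]
      simp
    have f3 : ((a :: b :: t) ++ [x]).min? = some (min m1 x) := by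
      rw [List.cons_append, List.min?_cons', List.foldl_append, ← hm1]
      simp
    have f4 : (prods2 ((a :: b :: t) ++ [x])).max? = some (max M2 (max (M1 * x) (m1 * x))) := by
      rw [max?_perm _ _ (prods2_append (a :: b :: t) x), hp2, List.cons_append, List.max?_cons',
        List.foldl_append, ← hM2]
      simp only [List.map_cons]
      rw [List.foldl_cons, foldl_max_pull,
        show (b * x :: List.map (fun z => z * x) t) = List.map (fun z => z * x) (b :: t) from rfl,
        foldl_max_map_mul]
    have f5 : (prods2 ((a :: b :: t) ++ [x])).min? = some (min m2 (min (M1 * x) (m1 * x))) := by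
      rw [min?_perm _ _ (prods2_append (a :: b :: t) x), hp2, List.cons_append, List.min?_cons',
        List.foldl_append, ← hm2]
      simp only [List.map_cons]
      rw [List.foldl_cons, foldl_min_pull,
        show (b * x :: List.map (fun z => z * x) t) = List.map (fun z => z * x) (b :: t) from rfl,
        foldl_min_map_mul]
    simp only [sigma, f1, f2, f3, f4, f5]

theorem foldl_step_sigma (xs : List Int) : ∀ p, xs.foldl fgpotStep (sigma p) = sigma (p ++ xs) := by
  induction xs with
  | nil => intro p; simp
  | cons x t ih =>
    intro p
    simp only [List.foldl_cons, step_sigma, ih (p ++ [x]), List.append_assoc, List.singleton_append]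

-- step counts
theorem len_prods2 (l : List Int) :
    2 * ((prods2 l).length : Int) = (l.length : Int) * ((l.length : Int) - 1) := by
  induction l with
  | nil => simp [prods2]
  | cons y t ih =>
    simp only [prods2, List.length_append, List.length_map, List.length_cons]
    push_cast
    push_cast at ih
    linear_combination ih

theorem len_prods3 (l : List Int) :
    6 * ((prods3 l).length : Int)
      = (l.length : Int) * ((l.length : Int) - 1) * ((l.length : Int) - 2) := by
  induction l with
  | nil => simp [prods3]
  | cons y t ih =>
    have h2 := len_prods2 t
    simp only [prods3, List.length_append, List.length_map, List.length_cons]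
    push_cast
    push_cast at ih h2
    linear_combination 3 * h2 + ih

-- A characterized: steps = number of triples, g = running max over all triple products
theorem inner1_eq (zs : List Int) : ∀ (p2 g st : Int),
    zs.foldl (fun s z => (if s.1 < p2 * z then p2 * z else s.1, s.2 + 1)) (g, st)
      = ((zs.map (fun z => p2 * z)).foldl max g, st + (zs.length : Int)) := by
  induction zs with
  | nil => intro p2 g st; simp
  | cons z t ih =>
    intro p2 g st
    rw [List.foldl_cons, ih]
    simp only [List.map_cons, List.foldl_cons, if_lt_eq_max, List.length_cons, Prod.mk.injEq]
    refine ⟨trivial, by push_cast; ring⟩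

theorem mid_eq (Ar : List Int) (x : Int) : ∀ (m k : Nat), Ar.length - k = m → k ≤ Ar.length →
    ∀ (g st : Int),
    (PySem.List.pyRange (k : Int) ((Ar.length : Int)) 1).foldl (fun s b =>
      (PySem.List.pyRange (b + 1) ((Ar.length : Int)) 1).foldl (fun s c =>
        (if s.1 < x * PySem.List.pyGetD Ar b 0 * PySem.List.pyGetD Ar c 0
         then x * PySem.List.pyGetD Ar b 0 * PySem.List.pyGetD Ar c 0 else s.1,
         s.2 + 1)) s) (g, st)
      = (((prods2 (Ar.drop k)).map (fun q => x * q)).foldl max g,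
         st + ((prods2 (Ar.drop k)).length : Int)) := by
  intro m
  induction m with
  | zero =>
    intro k hm hk g st
    have hk' : k = Ar.length := by omega
    subst hk'
    rw [PySem.List.pyRange_one_eq_nil (by exact_mod_cast le_refl _)]
    simp [prods2]
  | succ m ih =>
    intro k hm hk g st
    have hklt : k < Ar.length := by omega
    rw [PySem.List.pyRange_one_cons (by exact_mod_cast hklt)]
    rw [List.foldl_cons]
    have hcast : (k : Int) + 1 = ((k + 1 : Nat) : Int) := by push_cast; ring
    rw [hcast, PySem.List.foldl_pyRange_pyGetD' Ar 0
      (fun s z => (if s.1 < x * PySem.List.pyGetD Ar (k : Int) 0 * z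
        then x * PySem.List.pyGetD Ar (k : Int) 0 * z else s.1, s.2 + 1)) (g, st) (by positivity)]
    have htn : ((k + 1 : Nat) : Int).toNat = k + 1 := by omega
    rw [htn, inner1_eq, ih (k + 1) (by omega) (by omega)]
    have hget : PySem.List.pyGetD Ar (k : Int) 0 = Ar[k] := by
      rw [PySem.List.pyGetD_natCast]; exact List.getD_eq_getElem Ar 0 hklt
    rw [hget, List.drop_eq_getElem_cons hklt]
    simp only [prods2, List.map_append, List.map_map, List.foldl_append, List.length_append,
      List.length_map, Prod.mk.injEq, Function.comp_def, mul_assoc]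
    refine ⟨trivial, by push_cast; ring⟩

theorem outer_eq (Ar : List Int) : ∀ (m k : Nat), Ar.length - k = m → k ≤ Ar.length →
    ∀ (g st : Int),
    (PySem.List.pyRange (k : Int) ((Ar.length : Int)) 1).foldl (fun s a =>
      (PySem.List.pyRange (a + 1) ((Ar.length : Int)) 1).foldl (fun s b =>
        (PySem.List.pyRange (b + 1) ((Ar.length : Int)) 1).foldl (fun s c =>
          (if s.1 < PySem.List.pyGetD Ar a 0 * PySem.List.pyGetD Ar b 0 * PySem.List.pyGetD Ar c 0
           then PySem.List.pyGetD Ar a 0 * PySem.List.pyGetD Ar b 0 * PySem.List.pyGetD Ar c 0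
           else s.1,
           s.2 + 1)) s) s) (g, st)
      = ((prods3 (Ar.drop k)).foldl max g, st + ((prods3 (Ar.drop k)).length : Int)) := by
  intro m
  induction m with
  | zero =>
    intro k hm hk g st
    have hk' : k = Ar.length := by omega
    subst hk'
    rw [PySem.List.pyRange_one_eq_nil (by exact_mod_cast le_refl _)]
    simp [prods3]
  | succ m ih =>
    intro k hm hk g st
    have hklt : k < Ar.length := by omega
    rw [PySem.List.pyRange_one_cons (by exact_mod_cast hklt)]
    rw [List.foldl_cons]
    have hcast : (k : Int) + 1 = ((k + 1 : Nat) : Int) := by push_cast; ring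
    rw [hcast, mid_eq Ar (PySem.List.pyGetD Ar (k : Int) 0) (Ar.length - (k + 1)) (k + 1) rfl (by omega),
      ih (k + 1) (by omega) (by omega)]
    have hget : PySem.List.pyGetD Ar (k : Int) 0 = Ar[k] := by
      rw [PySem.List.pyGetD_natCast]; exact List.getD_eq_getElem Ar 0 hklt
    rw [hget, List.drop_eq_getElem_cons hklt]
    simp only [prods3, List.foldl_append, List.length_append, List.length_map, Prod.mk.injEq]
    refine ⟨trivial, by push_cast; ring⟩

theorem fgpot_eq_prods3 (Ar : List Int) :
    fgpot Ar = (((prods3 Ar).length : Int), (prods3 Ar).foldl max 0) := by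
  have h := outer_eq Ar Ar.length 0 (by omega) (by omega) 0 0
  simp only [Nat.cast_zero, List.drop_zero, zero_add] at h
  simp only [fgpot, PySem.List.len_eq]
  rw [h]

theorem fgpot_alt_eq_prods3 (Ar : List Int) :
    fgpot_alt Ar = (((prods3 Ar).length : Int), (prods3 Ar).foldl max 0) := by
  have hσ : (((0 : Int), (none : Option Int), (none : Option Int), (none : Option Int),
      (none : Option Int))) = sigma [] := by simp [sigma, prods3, prods2]
  have h := foldl_step_sigma Ar []
  simp only [List.nil_append] at h
  simp only [fgpot_alt, hσ, h]
  simp only [sigma, Prod.mk.injEq]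
  refine ⟨?_, trivial⟩
  rw [PySem.List.len_eq, PySem.Int.floordiv_eq_ediv_of_pos (by norm_num), ← len_prods3]
  exact Int.mul_ediv_cancel_left _ (by norm_num)

-- ===== VERDICT (by name: the statement is the Claim_ definition above) =====
theorem fgpot_spec : Claim_equal_fgpot := by
  intro Ar _
  unfold Spec_fgpot
  rw [fgpot_eq_prods3, fgpot_alt_eq_prods3]
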